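-- pv_equiv track=rewrite | github.com/Gom3rye/CodingTest | 프로그래머스/3/81303. 표 편집/표 편집.py | solution
-- ===== SOURCE A (Python) =====
-- def solution(n, k, cmd):
--     # 각 행이 자신의 이전/다음 행 인덱스를 가리키는 이중 연결 리스트
--     # table[i] = [prev_idx, next_idx]
--     # None은 끝을 의미함
--     table = {i: [i - 1, i + 1] for i in range(n)}
--     table[0][0] = None
--     table[n - 1][1] = None
--
--     # 현재 선택된 행의 인덱스
--     current_k = k
--
--     # 삭제된 행을 저장할 스택
--     # (삭제된 행 인덱스, 이전 행 인덱스, 다음 행 인덱스)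
--     deleted_stack = []
--
--     for command in cmd:
--         parts = command.split()
--         op = parts[0]
--
--         if op == 'U':
--             x = int(parts[1])
--             for _ in range(x):
--                 current_k = table[current_k][0]
--
--         elif op == 'D':
--             x = int(parts[1])
--             for _ in range(x):
--                 current_k = table[current_k][1]
--
--         elif op == 'C':
--             # 1. 현재 노드의 이전/다음 노드 인덱스를 가져옴
--             prev_idx, next_idx = table[current_k]
--
--             # 2. 삭제 정보 스택에 저장
--             deleted_stack.append((current_k, prev_idx, next_idx))
--
--             # 3. 연결 리스트에서 현재 노드 제거
--             if prev_idx is not None: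
--                 table[prev_idx][1] = next_idx
--             if next_idx is not None:
--                 table[next_idx][0] = prev_idx
--
--             # 4. 현재 선택 위치(k) 변경
--             if next_idx is not None:
--                 current_k = next_idx
--             else: # 마지막 행을 삭제한 경우
--                 current_k = prev_idx
--
--         elif op == 'Z':
--             # 1. 가장 최근에 삭제된 정보 복구
--             restored_idx, prev_idx, next_idx = deleted_stack.pop()
--
--             # 2. 끊어졌던 연결을 다시 복구
--             if prev_idx is not None:
--                 table[prev_idx][1] = restored_idx
--             if next_idx is not None:
--                 table[next_idx][0] = restored_idx
--
--     # 최종 결과 생성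
--     answer = ['O'] * n
--     for idx, _, _ in deleted_stack:
--         answer[idx] = 'X'
--
--     return "".join(answer)
-- ===== SOURCE B (Python) =====
-- def solution(n, k, cmd):
--     # Cursor-over-sorted-list reimplementation: keep the alive row numbers in a
--     # sorted list with an integer cursor; U/D are O(1) cursor arithmetic instead
--     # of pointer walks, C/Z are pop/insert at the cursor position.
--     alive = list(range(n))
--     pos = k
--     stack = []  # (row number, list position it was removed from)
--     for command in cmd:
--         parts = command.split()
--         op = parts[0]
--         if op == 'U':
--             x = int(parts[1])
--             if x > 0:
--                 pos -= x
--         elif op == 'D':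
--             x = int(parts[1])
--             if x > 0:
--                 pos += x
--         elif op == 'C':
--             row = alive.pop(pos)
--             stack.append((row, pos))
--             if pos == len(alive):
--                 pos -= 1
--         elif op == 'Z':
--             row, d = stack.pop()
--             alive.insert(d, row)
--             if d <= pos:
--                 pos += 1
--     answer = ['O'] * n
--     for row, _ in stack:
--         answer[row] = 'X'
--     return "".join(answer)
-- ===== Notes on version B (the rewrite author's own statement) =====
-- stated objective: alternative
-- what changed: A simulates the table as a doubly linked list in a dict and walks pointers step by step for U/D; B keeps the alive row numbers in a sorted list with an integer cursor, so U/D become O(1) cursor arithmetic and C/Z become pop/insert at the recorded position.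
-- outside the precondition, e.g. on solution(6, 2, ['U 3']): A returns 'OOOOOO', B returns 'OOOOOO'; on solution(1, 0, ['C']): A returns 'X', B returns 'X'; on solution(7, 6, ['C', 'U 2', 'C', 'D 2', 'Z 9']): A returns 'OOOOOOX', B returns 'OOOOOOX'
import Mathlib
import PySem

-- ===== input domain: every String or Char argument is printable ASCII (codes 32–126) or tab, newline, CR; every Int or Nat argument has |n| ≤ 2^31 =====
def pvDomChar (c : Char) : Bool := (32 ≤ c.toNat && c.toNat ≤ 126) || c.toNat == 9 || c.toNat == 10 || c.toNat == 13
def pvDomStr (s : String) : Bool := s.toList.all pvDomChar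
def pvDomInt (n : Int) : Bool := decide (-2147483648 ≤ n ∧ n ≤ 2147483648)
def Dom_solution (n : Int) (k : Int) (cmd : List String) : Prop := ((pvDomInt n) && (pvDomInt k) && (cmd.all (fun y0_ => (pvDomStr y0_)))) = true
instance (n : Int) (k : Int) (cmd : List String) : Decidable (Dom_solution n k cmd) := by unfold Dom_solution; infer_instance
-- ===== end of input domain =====

-- B replaces A's doubly-linked-list pointer walks by a sorted alive-list with an integer
-- cursor (U/D become cursor arithmetic, C/Z become pop/insert); equivalence is proved on
-- valid command sequences (Pre_); objective: alternative algorithm, no speed claim.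

-- ===== PORT A =====
-- table[current_k] lookup; Python raises KeyError when current_k is None or absent (excluded by Pre_)
def pvA_look (T : PySem.Dict Int (Option Int × Option Int)) (ck : Option Int) : Option Int × Option Int :=
  match ck with
  | none => (none, none)
  | some c => T.getD c (none, none)

-- for _ in range(x): current_k = table[current_k][0]
def pvA_walkU (T : PySem.Dict Int (Option Int × Option Int)) : Nat → Option Int → Option Int
  | 0, ck => ck
  | x + 1, ck => pvA_walkU T x (pvA_look T ck).1

-- for _ in range(x): current_k = table[current_k][1]
def pvA_walkD (T : PySem.Dict Int (Option Int × Option Int)) : Nat → Option Int → Option Int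
  | 0, ck => ck
  | x + 1, ck => pvA_walkD T x (pvA_look T ck).2

-- one iteration of A's main loop; stack kept top-at-head (Python appends/pops at the end)
def pvA_step (s : PySem.Dict Int (Option Int × Option Int) × Option Int × List (Int × Option Int × Option Int))
    (command : String) :
    PySem.Dict Int (Option Int × Option Int) × Option Int × List (Int × Option Int × Option Int) :=
  match PySem.Str.split₀ command with
  | [] => s            -- parts[0] raises IndexError (excluded by Pre_)
  | op :: rest =>
    if op = "U" then
      match rest with
      | [] => s        -- parts[1] raises IndexError (excluded)
      | a :: _ =>
        match PySem.Int.ofStr? a with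
        | none => s    -- int() raises ValueError (excluded)
        | some x => (s.1, pvA_walkU s.1 x.toNat s.2.1, s.2.2)
    else if op = "D" then
      match rest with
      | [] => s
      | a :: _ =>
        match PySem.Int.ofStr? a with
        | none => s
        | some x => (s.1, pvA_walkD s.1 x.toNat s.2.1, s.2.2)
    else if op = "C" then
      let pn := pvA_look s.1 s.2.1
      let c := s.2.1.getD 0          -- current_k (Pre_ guarantees it is not None here)
      let T1 := match pn.1 with
        | some p => s.1.modify p (none, none) (fun v => (v.1, pn.2))
        | none => s.1
      let T2 := match pn.2 with
        | some q => T1.modify q (none, none) (fun v => (pn.1, v.2))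
        | none => T1
      let ck' := match pn.2 with
        | some q => some q
        | none => pn.1
      (T2, ck', (c, pn.1, pn.2) :: s.2.2)
    else if op = "Z" then
      match s.2.2 with
      | [] => s        -- pop from empty list raises IndexError (excluded)
      | (ri, p, q) :: rest' =>
        let T1 := match p with
          | some pp => s.1.modify pp (none, none) (fun v => (v.1, some ri))
          | none => s.1
        let T2 := match q with
          | some qq => T1.modify qq (none, none) (fun v => (some ri, v.2))
          | none => T1
        (T2, s.2.1, rest')
    else s

-- table = {i: [i-1, i+1] for i in range(n)}; table[0][0] = None; table[n-1][1] = None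
def pvA_init (n : Int) : PySem.Dict Int (Option Int × Option Int) :=
  (((PySem.List.pyRange 0 n 1).foldl
      (fun d i => d.insert i (some (i - 1), some (i + 1))) PySem.Dict.empty).modify 0 (none, none)
        (fun v => (none, v.2))).modify (n - 1) (none, none) (fun v => (v.1, none))

def solution (n : Int) (k : Int) (cmd : List String) : String :=
  let s := cmd.foldl pvA_step (pvA_init n, some k, [])
  String.ofList (s.2.2.reverse.foldl (fun (a : List Char) e => a.set e.1.toNat 'X')
    (List.replicate n.toNat 'O'))

-- ===== PORT B =====
-- one iteration of B's loop over (alive rows sorted, cursor position, undo stack top-at-head)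
def pvB_step (s : List Int × Int × List (Int × Int)) (command : String) :
    List Int × Int × List (Int × Int) :=
  match PySem.Str.split₀ command with
  | [] => s
  | op :: rest =>
    if op = "U" then
      match rest with
      | [] => s
      | a :: _ =>
        match PySem.Int.ofStr? a with
        | none => s
        | some x => if 0 < x then (s.1, s.2.1 - x, s.2.2) else s
    else if op = "D" then
      match rest with
      | [] => s
      | a :: _ =>
        match PySem.Int.ofStr? a with
        | none => s
        | some x => if 0 < x then (s.1, s.2.1 + x, s.2.2) else s
    else if op = "C" then
      match PySem.List.pop? s.1 s.2.1 with
      | none => s    -- alive.pop(pos) raises IndexError (excluded by Pre_)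
      | some (row, alive') =>
        (alive', if s.2.1 = (alive'.length : Int) then s.2.1 - 1 else s.2.1, (row, s.2.1) :: s.2.2)
    else if op = "Z" then
      match s.2.2 with
      | [] => s      -- pop from empty list raises IndexError (excluded)
      | (row, d) :: rest' =>
        (PySem.List.insert s.1 d row, if d ≤ s.2.1 then s.2.1 + 1 else s.2.1, rest')
    else s

def solution_alt (n : Int) (k : Int) (cmd : List String) : String :=
  let s := cmd.foldl pvB_step (PySem.List.pyRange 0 n 1, k, [])
  String.ofList (s.2.2.reverse.foldl (fun (a : List Char) e => a.set e.1.toNat 'X')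
    (List.replicate n.toNat 'O'))

-- ===== PRECONDITION & SPEC =====
-- Validity machine for Pre_: tracks only (cursor rank, alive count, stack of removal ranks)
-- and fails exactly on the command-sequence shapes excluded below; it is not either port's
-- algorithm (no table, no row numbers, no output).
def pvV_step (s : Option (Int × Int × List Int)) (command : String) : Option (Int × Int × List Int) :=
  match s with
  | none => none
  | some (r, m, ds) =>
    match PySem.Str.split₀ command with
    | [] => none
    | op :: rest =>
      if op = "U" then
        match rest with
        | [] => none
        | a :: _ =>
          match PySem.Int.ofStr? a with
          | none => none
          | some x =>
            if 0 < x then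
              if 0 ≤ r - x ∧ r ≤ m - 1 then some (r - x, m, ds) else none
            else some (r, m, ds)
      else if op = "D" then
        match rest with
        | [] => none
        | a :: _ =>
          match PySem.Int.ofStr? a with
          | none => none
          | some x =>
            if 0 < x then
              if 0 ≤ r ∧ r + x ≤ m - 1 then some (r + x, m, ds) else none
            else some (r, m, ds)
      else if op = "C" then
        if 0 ≤ r ∧ r < m ∧ 2 ≤ m then
          some ((if r = m - 1 then r - 1 else r), m - 1, r :: ds)
        else none
      else if op = "Z" then
        match ds with
        | [] => none
        | d :: ds' => some ((if d ≤ r then r + 1 else r), m + 1, ds')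
      else some (r, m, ds)

-- Pre_ excludes inputs where A raises (n ≤ 0, malformed commands, moves past the table,
-- undo on an empty stack) and, with them, the borderline sequences that move the cursor one
-- step off the table or delete the last remaining row without dereferencing the cursor again:
-- there A happens to return only because its off-table None cursor is never touched again.
def Pre_solution (n : Int) (k : Int) (cmd : List String) : Prop :=
  1 ≤ n ∧ (cmd.foldl pvV_step (some (k, n, []))).isSome = true
instance (n : Int) (k : Int) (cmd : List String) : Decidable (Pre_solution n k cmd) := by
  unfold Pre_solution; infer_instance

def pvWitness_solution : Int × Int × List String := (8, 2, ["D 2", "C", "C", "C", "U 3", "Z", "Z", "D 4", "C", "U 2", "Z", "Z"])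

def Spec_solution (n : Int) (k : Int) (cmd : List String) (out : String) : Prop := out = solution_alt n k cmd
instance (n : Int) (k : Int) (cmd : List String) (out : String) : Decidable (Spec_solution n k cmd out) := by unfold Spec_solution; infer_instance

-- ===== CLAIM (what is proved, stated in full; the proofs are below) =====
def Claim_equal_solution : Prop := ∀ (n : Int) (k : Int) (cmd : List String), Dom_solution n k cmd → Pre_solution n k cmd → Spec_solution n k cmd (solution n k cmd)

-- ===== LEMMAS AND PROOFS =====

-- the (prev, next) pair the doubly linked list must store for the row at position i of the
-- sorted alive list
def pvLinkAt (alive : List Int) (i : Nat) : Option Int × Option Int :=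
  (if i = 0 then none else alive[i - 1]?, alive[i + 1]?)

-- correspondence of the two undo stacks relative to the current alive list: popping the
-- entries top-down reinserts each row at its recorded position and re-creates the recorded
-- (prev, next) links, which the table still stores for the removed row
def pvStackInv (nn : Int) (T : PySem.Dict Int (Option Int × Option Int)) :
    List Int → List (Int × Option Int × Option Int) → List (Int × Int) → Prop
  | _, [], sb => sb = []
  | alive, (idx, p, q) :: sa, sb =>
    match sb with
    | [] => False
    | (idx', d) :: sb' =>
      idx' = idx ∧ 0 ≤ idx ∧ idx < nn ∧ 0 ≤ d ∧ d.toNat ≤ alive.length ∧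
      (∀ a ∈ alive.take d.toNat, a < idx) ∧ (∀ a ∈ alive.drop d.toNat, idx < a) ∧
      p = (if d.toNat = 0 then none else alive[d.toNat - 1]?) ∧
      q = alive[d.toNat]? ∧
      T.getD idx (none, none) = (p, q) ∧
      pvStackInv nn T (alive.insertIdx d.toNat idx) sa sb'

-- main simulation invariant: table encodes the alive list as a doubly linked list, the
-- cursor row sits at position pos, and the stacks correspond
def pvInvGood (nn : Int) (T : PySem.Dict Int (Option Int × Option Int)) (ck : Option Int)
    (sa : List (Int × Option Int × Option Int)) (alive : List Int) (pos : Int)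
    (sb : List (Int × Int)) : Prop :=
  List.Pairwise (· < ·) alive ∧ (∀ a ∈ alive, 0 ≤ a ∧ a < nn) ∧
  (∀ (i : Nat) (h : i < alive.length), T.getD alive[i] (none, none) = pvLinkAt alive i) ∧
  0 ≤ pos ∧ pos < (alive.length : Int) ∧ ck = alive[pos.toNat]? ∧
  pvStackInv nn T alive sa sb

-- either the simulation invariant holds, or k is off the table and both runs are still in
-- their initial states (then the validity machine admits no table-touching command)
def pvInv (nn k : Int) (T : PySem.Dict Int (Option Int × Option Int)) (ck : Option Int)
    (sa : List (Int × Option Int × Option Int)) (alive : List Int) (pos : Int)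
    (sb : List (Int × Int)) : Prop :=
  pvInvGood nn T ck sa alive pos sb ∨
  ((k < 0 ∨ nn ≤ k) ∧ T = pvA_init nn ∧ ck = some k ∧ sa = [] ∧
    alive = PySem.List.pyRange 0 nn 1 ∧ pos = k ∧ sb = [])

lemma insertIdx_eq_take_cons_drop (xs : List Int) (i : Nat) (v : Int) (h : i ≤ xs.length) :
    xs.insertIdx i v = xs.take i ++ v :: xs.drop i := by
  induction xs generalizing i with
  | nil => simp_all
  | cons a t ih =>
    cases i with
    | zero => simp
    | succ j => simp [List.insertIdx_succ_cons, ih j (by simpa using h)]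

lemma pvV_foldl_none (cmds : List String) : cmds.foldl pvV_step none = none := by
  induction cmds with
  | nil => rfl
  | cons c t ih => simpa [pvV_step] using ih

lemma base_getD_nat (m : Nat) (j : Int) :
    (((PySem.List.pyRange 0 (m : Int) 1).foldl
        (fun d i => d.insert i (some (i - 1), some (i + 1))) PySem.Dict.empty).getD j (none, none))
      = if 0 ≤ j ∧ j < (m : Int) then (some (j - 1), some (j + 1)) else (none, none) := by
  induction m with
  | zero => simp [PySem.List.pyRange_one_eq_nil, PySem.Dict.getD_empty]
  | succ m ih =>
    have hcast : ((m + 1 : Nat) : Int) = (m : Int) + 1 := by push_cast; ring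
    rw [hcast, PySem.List.pyRange_one_succ_right (by positivity), List.foldl_append]
    simp only [List.foldl, PySem.Dict.getD_insert]
    rw [ih]
    by_cases hj : j = (m : Int)
    · simp [hj]
    · by_cases h0 : 0 ≤ j ∧ j < (m : Int)
      · simp [hj, h0, (by omega : j < (m : Int) + 1)]
      · have : ¬ (0 ≤ j ∧ j < (m : Int) + 1) := by omega
        rw [if_neg h0, if_neg this, if_neg (by omega : ¬ j = (m:Int))]

lemma init_getD (nn : Int) (h1 : 1 ≤ nn) (j : Int) (hj0 : 0 ≤ j) (hj : j < nn) :
    (pvA_init nn).getD j (none, none)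
      = (if j = 0 then none else some (j - 1), if j = nn - 1 then none else some (j + 1)) := by
  have hnn : nn = ((nn.toNat : Nat) : Int) := by omega
  have hbase : ∀ x : Int,
      (((PySem.List.pyRange 0 nn 1).foldl
        (fun d i => d.insert i (some (i - 1), some (i + 1))) PySem.Dict.empty).getD x (none, none))
      = if 0 ≤ x ∧ x < nn then (some (x - 1), some (x + 1)) else (none, none) := by
    intro x
    conv_lhs => rw [hnn]
    rw [base_getD_nat, ← hnn]
  simp only [pvA_init, PySem.Dict.getD_modify, hbase]
  by_cases hB : j = 0
  · subst hB
    by_cases hA : nn - 1 = 0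
    · have e : nn = 1 := by omega
      subst e; norm_num
    · simp only [hA, if_false, (by omega : (0:Int) ≤ 0 ∧ 0 < nn), if_true]
      rw [if_neg (by omega : ¬ (0:Int) = nn - 1), if_neg (by omega : ¬ (0:Int) = nn - 1)]
      norm_num
  · by_cases hA : j = nn - 1
    · subst hA
      simp only [(by omega : ¬ nn - 1 = 0), if_false,
        (by omega : (0:Int) ≤ nn - 1 ∧ nn - 1 < nn), if_true]
      norm_num [hB]
    · rw [if_neg hA, if_neg (by omega : ¬ j = 0)]
      rw [if_pos (by omega : (0:Int) ≤ j ∧ j < nn), if_neg hB, if_neg hA]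

lemma init_link (nn : Int) (h1 : 1 ≤ nn) (i : Nat) (h : i < (PySem.List.pyRange 0 nn 1).length) :
    (pvA_init nn).getD (PySem.List.pyRange 0 nn 1)[i] (none, none)
      = pvLinkAt (PySem.List.pyRange 0 nn 1) i := by
  have hi : i < nn.toNat := by
    simpa [PySem.List.length_pyRange_one] using h
  rw [PySem.List.getElem_pyRange_one]
  rw [init_getD nn h1 (0 + (i : Int)) (by omega) (by omega)]
  unfold pvLinkAt
  rw [PySem.List.getElem?_pyRange_one, PySem.List.getElem?_pyRange_one]
  refine Prod.ext ?_ ?_ <;> split_ifs <;>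
    first
    | rfl
    | (exfalso; omega)
    | (dsimp only; congr 1; omega)

lemma pvInv_init (nn k : Int) (h1 : 1 ≤ nn) :
    pvInv nn k (pvA_init nn) (some k) [] (PySem.List.pyRange 0 nn 1) k [] := by
  by_cases hk : 0 ≤ k ∧ k < nn
  · left
    refine ⟨PySem.List.pairwise_lt_pyRange_one 0 nn, ?_, init_link nn h1, hk.1, ?_, ?_, rfl⟩
    · intro a ha
      have := (PySem.List.mem_pyRange_one).mp ha
      omega
    · rw [PySem.List.length_pyRange_one]; omega
    · rw [PySem.List.getElem?_pyRange_one]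
      rw [if_pos (by omega : k.toNat < (nn - 0).toNat)]
      congr 1
      omega
  · right
    exact ⟨by omega, rfl, rfl, rfl, rfl, rfl, rfl⟩

lemma walkU_eq (T : PySem.Dict Int (Option Int × Option Int)) (alive : List Int)
    (hlink : ∀ (i : Nat) (h : i < alive.length), T.getD alive[i] (none, none) = pvLinkAt alive i) :
    ∀ (x i : Nat), i < alive.length → x ≤ i →
      pvA_walkU T x alive[i]? = alive[i - x]? := by
  intro x
  induction x with
  | zero => intro i _ _; rfl
  | succ x ih =>
    intro i hi hx
    have h1 : (1 : Nat) ≤ i := by omega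
    rw [pvA_walkU, List.getElem?_eq_getElem hi]
    have hlook : (pvA_look T (some alive[i])).1 = alive[i - 1]? := by
      simp only [pvA_look, hlink i hi, pvLinkAt]
      rw [if_neg (by omega : ¬ i = 0)]
    rw [hlook, ih (i - 1) (by omega) (by omega)]
    congr 1
    omega

lemma walkD_eq (T : PySem.Dict Int (Option Int × Option Int)) (alive : List Int)
    (hlink : ∀ (i : Nat) (h : i < alive.length), T.getD alive[i] (none, none) = pvLinkAt alive i) :
    ∀ (x i : Nat), i + x < alive.length →
      pvA_walkD T x alive[i]? = alive[i + x]? := by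
  intro x
  induction x with
  | zero => intro i _; rfl
  | succ x ih =>
    intro i hi
    have hilt : i < alive.length := by omega
    rw [pvA_walkD, List.getElem?_eq_getElem hilt]
    have hlook : (pvA_look T (some alive[i])).2 = alive[i + 1]? := by
      simp only [pvA_look, hlink i hilt, pvLinkAt]
    rw [hlook, ih (i + 1) (by omega)]
    congr 1
    omega

lemma stackinv_not_mem (nn : Int) (T : PySem.Dict Int (Option Int × Option Int))
    (alive : List Int) (idx : Int) (p q : Option Int) (sa : List (Int × Option Int × Option Int))
    (sb : List (Int × Int)) (h : pvStackInv nn T alive ((idx, p, q) :: sa) sb) : idx ∉ alive := by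
  cases sb with
  | nil => exact absurd h (by simp [pvStackInv])
  | cons e sb' =>
    obtain ⟨e1, e2⟩ := e
    obtain ⟨-, -, -, -, -, h6, h7, -⟩ := h
    intro hmem
    rw [← List.take_append_drop e2.toNat alive] at hmem
    rcases List.mem_append.mp hmem with hm | hm
    · exact lt_irrefl idx (h6 idx hm)
    · exact lt_irrefl idx (h7 idx hm)

lemma stackinv_mono (nn : Int) (T T' : PySem.Dict Int (Option Int × Option Int)) :
    ∀ (alive : List Int) (sa : List (Int × Option Int × Option Int)) (sb : List (Int × Int)),
      pvStackInv nn T alive sa sb →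
      (∀ x : Int, x ∉ alive → T'.getD x (none, none) = T.getD x (none, none)) →
      pvStackInv nn T' alive sa sb := by
  intro alive sa
  induction sa generalizing alive with
  | nil => intro sb h _; exact h
  | cons e sa' ih =>
    obtain ⟨idx, p, q⟩ := e
    intro sb h hagree
    cases sb with
    | nil => exact absurd h (by simp [pvStackInv])
    | cons f sb' =>
      obtain ⟨f1, f2⟩ := f
      have hnm : idx ∉ alive := stackinv_not_mem nn T alive idx p q sa' ((f1, f2) :: sb') h
      obtain ⟨h1, h2, h3, h4, h5, h6, h7, h8, h9, h10, h11⟩ := h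
      refine ⟨h1, h2, h3, h4, h5, h6, h7, h8, h9, ?_, ?_⟩
      · rw [hagree idx hnm, h10]
      · refine ih (alive.insertIdx f2.toNat idx) sb' h11 ?_
        intro x hx
        refine hagree x ?_
        intro hxa
        exact hx ((List.mem_insertIdx h5).mpr (Or.inr hxa))

lemma stackinv_fst (nn : Int) (T : PySem.Dict Int (Option Int × Option Int)) :
    ∀ (alive : List Int) (sa : List (Int × Option Int × Option Int)) (sb : List (Int × Int)),
      pvStackInv nn T alive sa sb → sa.map (·.1) = sb.map (·.1) := by
  intro alive sa
  induction sa generalizing alive with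
  | nil => intro sb h; rw [h]; rfl
  | cons e sa' ih =>
    obtain ⟨idx, p, q⟩ := e
    intro sb h
    cases sb with
    | nil => exact absurd h (by simp [pvStackInv])
    | cons f sb' =>
      obtain ⟨f1, f2⟩ := f
      obtain ⟨h1, -, -, -, -, -, -, -, -, -, h11⟩ := h
      simp only [List.map_cons, h1]
      rw [ih (alive.insertIdx f2.toNat idx) sb' h11]

lemma set_fold_eq : ∀ (sa : List (Int × Option Int × Option Int)) (sb : List (Int × Int)),
    sa.map (·.1) = sb.map (·.1) → ∀ (init : List Char),
      sa.foldl (fun (a : List Char) e => a.set e.1.toNat 'X') init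
        = sb.foldl (fun (a : List Char) e => a.set e.1.toNat 'X') init := by
  intro sa
  induction sa with
  | nil =>
    intro sb h init
    have : sb = [] := by simpa using (List.map_eq_nil_iff).mp h.symm
    rw [this]; rfl
  | cons e sa' ih =>
    intro sb h init
    cases sb with
    | nil => simp at h
    | cons f sb' =>
      simp only [List.map_cons, List.cons.injEq] at h
      simp only [List.foldl_cons, h.1]
      exact ih sb' h.2 _


-- the table surgery both C and Z perform: at p replace the next-pointer by pn2, at q the
-- prev-pointer by qn1 (None checks as in A)
def pvAdj (T : PySem.Dict Int (Option Int × Option Int)) (p q : Option Int)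
    (pn2 qn1 : Option Int) : PySem.Dict Int (Option Int × Option Int) :=
  let T1 := match p with
    | some pp => T.modify pp (none, none) (fun v => (v.1, pn2))
    | none => T
  match q with
  | some qq => T1.modify qq (none, none) (fun v => (qn1, v.2))
  | none => T1

lemma getD_pvAdj (T : PySem.Dict Int (Option Int × Option Int)) (p q pn2 qn1 : Option Int)
    (hpq : ∀ pp qq : Int, p = some pp → q = some qq → pp ≠ qq) (x : Int) :
    (pvAdj T p q pn2 qn1).getD x (none, none) =
      if p = some x then ((T.getD x (none, none)).1, pn2)
      else if q = some x then (qn1, (T.getD x (none, none)).2)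
      else T.getD x (none, none) := by
  cases p with
  | none =>
    cases q with
    | none => simp [pvAdj]
    | some qq =>
      simp only [pvAdj, PySem.Dict.getD_modify]
      by_cases hx : x = qq <;> simp_all [eq_comm]
  | some pp =>
    cases q with
    | none =>
      simp only [pvAdj, PySem.Dict.getD_modify]
      by_cases hx : x = pp <;> simp_all [eq_comm]
    | some qq =>
      have hne : pp ≠ qq := hpq pp qq rfl rfl
      simp only [pvAdj, PySem.Dict.getD_modify]
      by_cases hxq : x = qq <;> by_cases hxp : x = pp <;>
        simp_all [eq_comm]

lemma getD_pvAdj_not_mem (T : PySem.Dict Int (Option Int × Option Int)) (p q pn2 qn1 : Option Int)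
    (alive : List Int) (hp : ∀ pp : Int, p = some pp → pp ∈ alive)
    (hq : ∀ qq : Int, q = some qq → qq ∈ alive)
    (hpq : ∀ pp qq : Int, p = some pp → q = some qq → pp ≠ qq) (x : Int) (hx : x ∉ alive) :
    (pvAdj T p q pn2 qn1).getD x (none, none) = T.getD x (none, none) := by
  rw [getD_pvAdj T p q pn2 qn1 hpq x]
  rw [if_neg (fun h => hx (hp x h)), if_neg (fun h => hx (hq x h))]

lemma getElem_lt_getElem (alive : List Int) (hsort : List.Pairwise (· < ·) alive)
    (i j : Nat) (hi : i < alive.length) (hj : j < alive.length) (hij : i < j) :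
    alive[i] < alive[j] :=
  List.pairwise_iff_getElem.mp hsort i j hi hj hij

lemma getElem_inj (alive : List Int) (hsort : List.Pairwise (· < ·) alive)
    (i j : Nat) (hi : i < alive.length) (hj : j < alive.length) (h : alive[i] = alive[j]) :
    i = j := by
  rcases Nat.lt_trichotomy i j with hlt | he | hgt
  · exact absurd h (ne_of_lt (getElem_lt_getElem alive hsort i j hi hj hlt))
  · exact he
  · exact absurd h.symm (ne_of_lt (getElem_lt_getElem alive hsort j i hj hi hgt))

lemma link_erase (T : PySem.Dict Int (Option Int × Option Int)) (alive : List Int) (pt : Nat)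
    (hpt : pt < alive.length) (hsort : List.Pairwise (· < ·) alive)
    (hlink : ∀ (i : Nat) (h : i < alive.length), T.getD alive[i] (none, none) = pvLinkAt alive i) :
    ∀ (i : Nat) (h : i < (alive.eraseIdx pt).length),
      (pvAdj T (pvLinkAt alive pt).1 (pvLinkAt alive pt).2
          (pvLinkAt alive pt).2 (pvLinkAt alive pt).1).getD
        (alive.eraseIdx pt)[i] (none, none) = pvLinkAt (alive.eraseIdx pt) i := by
  have hpq : ∀ pp qq : Int,
      (pvLinkAt alive pt).1 = some pp → (pvLinkAt alive pt).2 = some qq → pp ≠ qq := by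
    intro pp qq hp hq
    simp only [pvLinkAt] at hp hq
    by_cases h0 : pt = 0
    · simp [h0] at hp
    · rw [if_neg h0] at hp
      have h2 : pt + 1 < alive.length := by
        by_contra hc
        rw [List.getElem?_eq_none (by omega)] at hq
        cases hq
      rw [List.getElem?_eq_getElem (by omega : pt - 1 < alive.length)] at hp
      rw [List.getElem?_eq_getElem h2] at hq
      cases hp; cases hq
      exact ne_of_lt (getElem_lt_getElem alive hsort _ _ (by omega) h2 (by omega))
  intro i h
  have hlen : (alive.eraseIdx pt).length = alive.length - 1 := by
    rw [List.length_eraseIdx]; simp [hpt]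
  have hil : i < alive.length - 1 := by rwa [hlen] at h
  have hEi : ∀ j : Nat, (alive.eraseIdx pt)[j]? = if j < pt then alive[j]? else alive[j + 1]? :=
    fun j => List.getElem?_eraseIdx
  rw [getD_pvAdj _ _ _ _ _ hpq]
  by_cases hip : i + 1 = pt
  · -- i is the left neighbour of the removed row
    have h0 : ¬ pt = 0 := by omega
    have hEiv : (alive.eraseIdx pt)[i] = alive[i]'(by omega) := by
      have := hEi i
      rw [if_pos (by omega), List.getElem?_eq_getElem h, List.getElem?_eq_getElem (by omega : i < alive.length)] at this
      exact Option.some.inj this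
    rw [if_pos (by
      simp only [pvLinkAt]
      rw [if_neg h0, (by omega : pt - 1 = i), List.getElem?_eq_getElem (by omega : i < alive.length), hEiv])]
    rw [hEiv, hlink i (by omega)]
    simp only [pvLinkAt]
    refine Prod.ext ?_ ?_
    · dsimp only
      by_cases hi0 : i = 0
      · rw [if_pos hi0, if_pos hi0]
      · rw [if_neg hi0, if_neg hi0, hEi (i - 1), if_pos (by omega)]
    · dsimp only
      rw [hEi (i + 1), if_neg (by omega), (by omega : i + 1 + 1 = pt + 1)]
  · by_cases hie : i = pt
    · -- i is where the right neighbour now sits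
      have h2 : pt + 1 < alive.length := by omega
      have hEiv : (alive.eraseIdx pt)[i] = alive[pt + 1]'h2 := by
        have := hEi i
        rw [if_neg (by omega), List.getElem?_eq_getElem h,
          List.getElem?_eq_getElem (by omega : i + 1 < alive.length)] at this
        have h3 := Option.some.inj this
        rw [h3]
        congr 1
        omega
      rw [if_neg (by
        intro hc
        simp only [pvLinkAt] at hc
        by_cases h0 : pt = 0
        · rw [if_pos h0] at hc; cases hc
        · rw [if_neg h0, List.getElem?_eq_getElem (by omega : pt - 1 < alive.length), hEiv] at hc
          have := getElem_inj alive hsort _ _ (by omega) h2 (Option.some.inj hc)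
          omega)]
      rw [if_pos (by
        simp only [pvLinkAt]
        rw [List.getElem?_eq_getElem h2, hEiv])]
      rw [hEiv, hlink (pt + 1) h2]
      simp only [pvLinkAt]
      refine Prod.ext ?_ ?_
      · dsimp only
        by_cases h0 : pt = 0
        · rw [if_pos h0, if_pos (by omega : i = 0)]
        · rw [if_neg h0, if_neg (by omega : ¬ i = 0), hEi (i - 1), if_pos (by omega),
            (by omega : i - 1 = pt - 1)]
      · dsimp only
        rw [hEi (i + 1), if_neg (by omega), (by omega : i + 1 + 1 = pt + 1 + 1)]
    · -- rows away from the removed one keep their links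
      rcases (by omega : i < pt ∨ pt < i) with hlt | hgt
      · have hEiv : (alive.eraseIdx pt)[i] = alive[i]'(by omega) := by
          have := hEi i
          rw [if_pos hlt, List.getElem?_eq_getElem h,
            List.getElem?_eq_getElem (by omega : i < alive.length)] at this
          exact Option.some.inj this
        rw [if_neg (by
          intro hc
          simp only [pvLinkAt] at hc
          by_cases h0 : pt = 0
          · rw [if_pos h0] at hc; cases hc
          · rw [if_neg h0, List.getElem?_eq_getElem (by omega : pt - 1 < alive.length), hEiv] at hc
            have := getElem_inj alive hsort _ _ (by omega) (by omega) (Option.some.inj hc)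
            omega)]
        rw [if_neg (by
          intro hc
          simp only [pvLinkAt] at hc
          have h2 : pt + 1 < alive.length := by
            by_contra hc2
            rw [List.getElem?_eq_none (by omega)] at hc
            cases hc
          rw [List.getElem?_eq_getElem h2, hEiv] at hc
          have := getElem_inj alive hsort _ _ h2 (by omega) (Option.some.inj hc)
          omega)]
        rw [hEiv, hlink i (by omega)]
        simp only [pvLinkAt]
        refine Prod.ext ?_ ?_
        · dsimp only
          by_cases hi0 : i = 0
          · rw [if_pos hi0, if_pos hi0]
          · rw [if_neg hi0, if_neg hi0, hEi (i - 1), if_pos (by omega)]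
        · dsimp only
          rw [hEi (i + 1), if_pos (by omega)]
      · have hEiv : (alive.eraseIdx pt)[i] = alive[i + 1]'(by omega) := by
          have := hEi i
          rw [if_neg (by omega), List.getElem?_eq_getElem h,
            List.getElem?_eq_getElem (by omega : i + 1 < alive.length)] at this
          exact Option.some.inj this
        rw [if_neg (by
          intro hc
          simp only [pvLinkAt] at hc
          by_cases h0 : pt = 0
          · rw [if_pos h0] at hc; cases hc
          · rw [if_neg h0, List.getElem?_eq_getElem (by omega : pt - 1 < alive.length), hEiv] at hc
            have := getElem_inj alive hsort _ _ (by omega) (by omega) (Option.some.inj hc)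
            omega)]
        rw [if_neg (by
          intro hc
          simp only [pvLinkAt] at hc
          have h2 : pt + 1 < alive.length := by
            by_contra hc2
            rw [List.getElem?_eq_none (by omega)] at hc
            cases hc
          rw [List.getElem?_eq_getElem h2, hEiv] at hc
          have := getElem_inj alive hsort _ _ h2 (by omega) (Option.some.inj hc)
          omega)]
        rw [hEiv, hlink (i + 1) (by omega)]
        simp only [pvLinkAt]
        refine Prod.ext ?_ ?_
        · dsimp only
          rw [if_neg (by omega : ¬ i + 1 = 0), if_neg (by omega : ¬ i = 0),
            hEi (i - 1), if_neg (by omega), (by omega : i - 1 + 1 = i)]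
          congr 1
        · dsimp only
          rw [hEi (i + 1), if_neg (by omega)]

lemma link_insert (T : PySem.Dict Int (Option Int × Option Int)) (alive : List Int) (dt : Nat)
    (ri : Int) (hdt : dt ≤ alive.length) (hsort : List.Pairwise (· < ·) alive)
    (hlink : ∀ (i : Nat) (h : i < alive.length), T.getD alive[i] (none, none) = pvLinkAt alive i)
    (htake : ∀ a ∈ alive.take dt, a < ri) (hdrop : ∀ a ∈ alive.drop dt, ri < a)
    (hTri : T.getD ri (none, none) = (if dt = 0 then none else alive[dt - 1]?, alive[dt]?)) :
    ∀ (i : Nat) (h : i < (alive.insertIdx dt ri).length),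
      (pvAdj T (if dt = 0 then none else alive[dt - 1]?) alive[dt]? (some ri) (some ri)).getD
        (alive.insertIdx dt ri)[i] (none, none) = pvLinkAt (alive.insertIdx dt ri) i := by
  have hlen : (alive.insertIdx dt ri).length = alive.length + 1 := by
    rw [List.length_insertIdx]; simp [hdt]
  have hIj : ∀ j : Nat, (alive.insertIdx dt ri)[j]? =
      if j < dt then alive[j]? else if j = dt then (if j ≤ alive.length then some ri else none)
      else alive[j - 1]? := fun j => List.getElem?_insertIdx
  have htake' : ∀ (j : Nat) (hj : j < dt), alive[j]'(by omega) < ri := by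
    intro j hj
    refine htake _ ?_
    have hjt : j < (alive.take dt).length := by
      rw [List.length_take]; omega
    have : (alive.take dt)[j] = alive[j]'(by omega) := List.getElem_take
    rw [← this]
    exact List.getElem_mem hjt
  have hdrop' : ∀ (j : Nat) (hj1 : dt ≤ j) (hj2 : j < alive.length), ri < alive[j]'hj2 := by
    intro j hj1 hj2
    refine hdrop _ ?_
    have hjt : j - dt < (alive.drop dt).length := by
      rw [List.length_drop]; omega
    have : (alive.drop dt)[j - dt] = alive[dt + (j - dt)]'(by omega) := List.getElem_drop
    have h2 : alive[dt + (j - dt)]'(by omega) = alive[j]'hj2 := by congr 1; omega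
    rw [h2] at this
    rw [← this]
    exact List.getElem_mem hjt
  have hri_ne : ∀ (j : Nat) (hj : j < alive.length), alive[j]'hj ≠ ri := by
    intro j hj
    rcases Nat.lt_or_ge j dt with hc | hc
    · exact ne_of_lt (htake' j hc)
    · exact (ne_of_lt (hdrop' j hc hj)).symm
  have hpq : ∀ pp qq : Int,
      (if dt = 0 then none else alive[dt - 1]?) = some pp → alive[dt]? = some qq → pp ≠ qq := by
    intro pp qq hp hq
    by_cases h0 : dt = 0
    · rw [if_pos h0] at hp; cases hp
    · rw [if_neg h0, List.getElem?_eq_getElem (by omega : dt - 1 < alive.length)] at hp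
      have h2 : dt < alive.length := by
        by_contra hc
        rw [List.getElem?_eq_none (by omega)] at hq
        cases hq
      rw [List.getElem?_eq_getElem h2] at hq
      cases hp; cases hq
      exact ne_of_lt (getElem_lt_getElem alive hsort _ _ (by omega) h2 (by omega))
  intro i h
  have hil : i < alive.length + 1 := by rwa [hlen] at h
  rw [getD_pvAdj _ _ _ _ _ hpq]
  rcases Nat.lt_trichotomy i dt with hlt | heq | hgt
  · -- positions left of the insertion point
    have hEiv : (alive.insertIdx dt ri)[i] = alive[i]'(by omega) := by
      have := hIj i
      rw [if_pos hlt, List.getElem?_eq_getElem h,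
        List.getElem?_eq_getElem (by omega : i < alive.length)] at this
      exact Option.some.inj this
    by_cases hip : i + 1 = dt
    · -- left neighbour of the inserted row: next-pointer rewired to ri
      rw [if_pos (by
        rw [if_neg (by omega : ¬ dt = 0), List.getElem?_eq_getElem (by omega : dt - 1 < alive.length), hEiv]
        congr 2
        omega)]
      rw [hEiv, hlink i (by omega)]
      simp only [pvLinkAt]
      refine Prod.ext ?_ ?_
      · dsimp only
        by_cases hi0 : i = 0
        · rw [if_pos hi0, if_pos hi0]
        · rw [if_neg hi0, if_neg hi0, hIj (i - 1), if_pos (by omega)]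
      · dsimp only
        rw [hIj (i + 1), if_neg (by omega), if_pos hip, if_pos (by omega)]
    · rw [if_neg (by
        intro hc
        by_cases h0 : dt = 0
        · rw [if_pos h0] at hc; cases hc
        · rw [if_neg h0, List.getElem?_eq_getElem (by omega : dt - 1 < alive.length), hEiv] at hc
          have := getElem_inj alive hsort _ _ (by omega) (by omega) (Option.some.inj hc)
          omega)]
      rw [if_neg (by
        intro hc
        have h2 : dt < alive.length := by
          by_contra hc2
          rw [List.getElem?_eq_none (by omega)] at hc
          cases hc
        rw [List.getElem?_eq_getElem h2, hEiv] at hc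
        have := getElem_inj alive hsort _ _ h2 (by omega) (Option.some.inj hc)
        omega)]
      rw [hEiv, hlink i (by omega)]
      simp only [pvLinkAt]
      refine Prod.ext ?_ ?_
      · dsimp only
        by_cases hi0 : i = 0
        · rw [if_pos hi0, if_pos hi0]
        · rw [if_neg hi0, if_neg hi0, hIj (i - 1), if_pos (by omega)]
      · dsimp only
        rw [hIj (i + 1), if_pos (by omega)]
  · -- the inserted row itself
    subst heq
    have hEiv : (alive.insertIdx i ri)[i] = ri := by
      have := hIj i
      rw [if_neg (by omega), if_pos rfl, if_pos (by omega), List.getElem?_eq_getElem h] at this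
      exact Option.some.inj this
    rw [if_neg (by
      intro hc
      by_cases h0 : i = 0
      · rw [if_pos h0] at hc; cases hc
      · rw [if_neg h0, List.getElem?_eq_getElem (by omega : i - 1 < alive.length), hEiv] at hc
        exact hri_ne _ _ (Option.some.inj hc))]
    rw [if_neg (by
      intro hc
      have h2 : i < alive.length := by
        by_contra hc2
        rw [List.getElem?_eq_none (by omega)] at hc
        cases hc
      rw [List.getElem?_eq_getElem h2, hEiv] at hc
      exact hri_ne _ _ (Option.some.inj hc))]
    rw [hEiv, hTri]
    simp only [pvLinkAt]
    refine Prod.ext ?_ ?_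
    · dsimp only
      by_cases hi0 : i = 0
      · rw [if_pos hi0, if_pos hi0]
      · rw [if_neg hi0, if_neg hi0, hIj (i - 1), if_pos (by omega)]
    · dsimp only
      rw [hIj (i + 1), if_neg (by omega), if_neg (by omega)]
      congr 1
  · -- positions right of the insertion point
    have hEiv : (alive.insertIdx dt ri)[i] = alive[i - 1]'(by omega) := by
      have := hIj i
      rw [if_neg (by omega), if_neg (by omega), List.getElem?_eq_getElem h,
        List.getElem?_eq_getElem (by omega : i - 1 < alive.length)] at this
      exact Option.some.inj this
    by_cases hiq : i = dt + 1
    · -- right neighbour of the inserted row: prev-pointer rewired to ri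
      rw [if_neg (by
        intro hc
        by_cases h0 : dt = 0
        · rw [if_pos h0] at hc; cases hc
        · rw [if_neg h0, List.getElem?_eq_getElem (by omega : dt - 1 < alive.length), hEiv] at hc
          have := getElem_inj alive hsort _ _ (by omega) (by omega) (Option.some.inj hc)
          omega)]
      rw [if_pos (by
        rw [List.getElem?_eq_getElem (by omega : dt < alive.length), hEiv]
        congr 2
        omega)]
      rw [hEiv, hlink (i - 1) (by omega)]
      simp only [pvLinkAt]
      refine Prod.ext ?_ ?_
      · dsimp only
        rw [if_neg (by omega : ¬ i = 0), hIj (i - 1), if_neg (by omega), if_pos (by omega),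
          if_pos (by omega)]
      · dsimp only
        rw [hIj (i + 1), if_neg (by omega), if_neg (by omega)]
        congr 1
        omega
    · rw [if_neg (by
        intro hc
        by_cases h0 : dt = 0
        · rw [if_pos h0] at hc; cases hc
        · rw [if_neg h0, List.getElem?_eq_getElem (by omega : dt - 1 < alive.length), hEiv] at hc
          have := getElem_inj alive hsort _ _ (by omega) (by omega) (Option.some.inj hc)
          omega)]
      rw [if_neg (by
        intro hc
        have h2 : dt < alive.length := by
          by_contra hc2
          rw [List.getElem?_eq_none (by omega)] at hc
          cases hc
        rw [List.getElem?_eq_getElem h2, hEiv] at hc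
        have := getElem_inj alive hsort _ _ h2 (by omega) (Option.some.inj hc)
        omega)]
      rw [hEiv, hlink (i - 1) (by omega)]
      simp only [pvLinkAt]
      refine Prod.ext ?_ ?_
      · dsimp only
        rw [if_neg (by omega : ¬ i - 1 = 0), if_neg (by omega : ¬ i = 0),
          hIj (i - 1), if_neg (by omega), if_neg (by omega)]
      · dsimp only
        rw [hIj (i + 1), if_neg (by omega), if_neg (by omega)]
        congr 1
        omega

lemma sorted_insert (alive : List Int) (dt : Nat) (ri : Int) (hdt : dt ≤ alive.length)
    (hsort : List.Pairwise (· < ·) alive)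
    (htake : ∀ a ∈ alive.take dt, a < ri) (hdrop : ∀ a ∈ alive.drop dt, ri < a) :
    List.Pairwise (· < ·) (alive.insertIdx dt ri) := by
  rw [insertIdx_eq_take_cons_drop alive dt ri hdt]
  have hsplit : List.Pairwise (· < ·) (alive.take dt ++ alive.drop dt) := by
    rw [List.take_append_drop]; exact hsort
  rw [List.pairwise_append] at hsplit ⊢
  refine ⟨hsplit.1, List.pairwise_cons.mpr ⟨fun a ha => hdrop a ha, hsplit.2.1⟩, ?_⟩
  intro a ha b hb
  rcases List.mem_cons.mp hb with hb | hb
  · exact hb ▸ htake a ha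
  · exact hsplit.2.2 a ha b hb

lemma good_U {nn : Int} {T : PySem.Dict Int (Option Int × Option Int)} {ck : Option Int}
    {sa : List (Int × Option Int × Option Int)} {alive : List Int} {pos : Int}
    {sb : List (Int × Int)} (hG : pvInvGood nn T ck sa alive pos sb)
    (x : Int) (hx : 0 < x) (h1 : 0 ≤ pos - x) (h2 : pos ≤ (alive.length : Int) - 1) :
    pvInvGood nn T (pvA_walkU T x.toNat ck) sa alive (pos - x) sb := by
  obtain ⟨hs, hb, hl, hp0, hpl, hck, hst⟩ := hG
  refine ⟨hs, hb, hl, by omega, by omega, ?_, hst⟩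
  rw [hck, walkU_eq T alive hl x.toNat pos.toNat (by omega) (by omega)]
  congr 1
  omega

lemma good_D {nn : Int} {T : PySem.Dict Int (Option Int × Option Int)} {ck : Option Int}
    {sa : List (Int × Option Int × Option Int)} {alive : List Int} {pos : Int}
    {sb : List (Int × Int)} (hG : pvInvGood nn T ck sa alive pos sb)
    (x : Int) (hx : 0 < x) (h1 : 0 ≤ pos) (h2 : pos + x ≤ (alive.length : Int) - 1) :
    pvInvGood nn T (pvA_walkD T x.toNat ck) sa alive (pos + x) sb := by
  obtain ⟨hs, hb, hl, hp0, hpl, hck, hst⟩ := hG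
  refine ⟨hs, hb, hl, by omega, by omega, ?_, hst⟩
  rw [hck, walkD_eq T alive hl x.toNat pos.toNat (by omega)]
  congr 1
  omega

lemma good_C {nn : Int} {T : PySem.Dict Int (Option Int × Option Int)} {ck : Option Int}
    {sa : List (Int × Option Int × Option Int)} {alive : List Int} {pos : Int}
    {sb : List (Int × Int)} {cur : Int} (hG : pvInvGood nn T ck sa alive pos sb)
    (h2 : 2 ≤ (alive.length : Int)) (hcur : ck = some cur) :
    pvInvGood nn
      (pvAdj T (T.getD cur (none, none)).1 (T.getD cur (none, none)).2
        (T.getD cur (none, none)).2 (T.getD cur (none, none)).1)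
      (match (T.getD cur (none, none)).2 with
        | some q => some q
        | none => (T.getD cur (none, none)).1)
      ((cur, (T.getD cur (none, none)).1, (T.getD cur (none, none)).2) :: sa)
      (alive.eraseIdx pos.toNat)
      (if pos = ((alive.eraseIdx pos.toNat).length : Int) then pos - 1 else pos)
      ((cur, pos) :: sb) := by
  obtain ⟨hsort, hbnd, hlink, hp0, hpl, hck, hstk⟩ := hG
  have hpt : pos.toNat < alive.length := by omega
  have hcur' : cur = alive[pos.toNat]'hpt := by
    rw [hck, List.getElem?_eq_getElem hpt] at hcur
    exact (Option.some.inj hcur).symm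
  subst hcur'
  have hTD : T.getD (alive[pos.toNat]'hpt) (none, none) = pvLinkAt alive pos.toNat :=
    hlink _ hpt
  rw [hTD]
  have hlenE : (alive.eraseIdx pos.toNat).length = alive.length - 1 := by
    rw [List.length_eraseIdx, if_pos hpt]
  have hEj : ∀ j : Nat, (alive.eraseIdx pos.toNat)[j]? =
      if j < pos.toNat then alive[j]? else alive[j + 1]? := fun j => List.getElem?_eraseIdx
  have hpq : ∀ pp qq : Int,
      (pvLinkAt alive pos.toNat).1 = some pp → (pvLinkAt alive pos.toNat).2 = some qq →
        pp ≠ qq := by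
    intro pp qq hp hq
    simp only [pvLinkAt] at hp hq
    by_cases h0 : pos.toNat = 0
    · rw [if_pos h0] at hp; cases hp
    · rw [if_neg h0, List.getElem?_eq_getElem (by omega : pos.toNat - 1 < alive.length)] at hp
      have h2' : pos.toNat + 1 < alive.length := by
        by_contra hc
        rw [List.getElem?_eq_none (by omega)] at hq
        cases hq
      rw [List.getElem?_eq_getElem h2'] at hq
      cases hp; cases hq
      exact ne_of_lt (getElem_lt_getElem alive hsort _ _ (by omega) h2' (by omega))
  have hsort' : List.Pairwise (· < ·) (alive.eraseIdx pos.toNat) :=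
    hsort.sublist (List.eraseIdx_sublist alive pos.toNat)
  have hbnd' : ∀ a ∈ alive.eraseIdx pos.toNat, 0 ≤ a ∧ a < nn := fun a ha =>
    hbnd a ((List.eraseIdx_sublist alive pos.toNat).subset ha)
  have hlink' := link_erase T alive pos.toNat hpt hsort hlink
  have hPmem : ∀ pp : Int, (pvLinkAt alive pos.toNat).1 = some pp → pp ∈ alive := by
    intro pp hp
    simp only [pvLinkAt] at hp
    by_cases h0 : pos.toNat = 0
    · rw [if_pos h0] at hp; cases hp
    · rw [if_neg h0, List.getElem?_eq_getElem (by omega : pos.toNat - 1 < alive.length)] at hp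
      cases hp
      exact List.getElem_mem _
  have hQmem : ∀ qq : Int, (pvLinkAt alive pos.toNat).2 = some qq → qq ∈ alive := by
    intro qq hq
    simp only [pvLinkAt] at hq
    have h2' : pos.toNat + 1 < alive.length := by
      by_contra hc
      rw [List.getElem?_eq_none (by omega)] at hq
      cases hq
    rw [List.getElem?_eq_getElem h2'] at hq
    cases hq
    exact List.getElem_mem _
  have hcur_nin : alive[pos.toNat]'hpt ∉ alive.eraseIdx pos.toNat := by
    intro hmem
    obtain ⟨j, hj, hjv⟩ := List.mem_iff_getElem.mp hmem
    have hjv' : (alive.eraseIdx pos.toNat)[j]? = some (alive[pos.toNat]'hpt) := by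
      rw [List.getElem?_eq_getElem hj, hjv]
    rw [hEj j] at hjv'
    split at hjv'
    · rw [List.getElem?_eq_getElem (by omega : j < alive.length)] at hjv'
      have := getElem_inj alive hsort _ _ (by omega) hpt (Option.some.inj hjv')
      omega
    · have hj1 : j + 1 < alive.length := by
        by_contra hc
        rw [List.getElem?_eq_none (by omega)] at hjv'
        cases hjv'
      rw [List.getElem?_eq_getElem hj1] at hjv'
      have := getElem_inj alive hsort _ _ hj1 hpt (Option.some.inj hjv')
      rw [hlenE] at hj
      omega
  have hT2cur : (pvAdj T (pvLinkAt alive pos.toNat).1 (pvLinkAt alive pos.toNat).2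
      (pvLinkAt alive pos.toNat).2 (pvLinkAt alive pos.toNat).1).getD
        (alive[pos.toNat]'hpt) (none, none)
      = ((pvLinkAt alive pos.toNat).1, (pvLinkAt alive pos.toNat).2) := by
    rw [getD_pvAdj _ _ _ _ _ hpq]
    rw [if_neg (by
      intro hc
      have := hPmem _ hc
      obtain ⟨j, hj, hjv⟩ := List.mem_iff_getElem.mp this
      simp only [pvLinkAt] at hc
      by_cases h0 : pos.toNat = 0
      · rw [if_pos h0] at hc; cases hc
      · rw [if_neg h0, List.getElem?_eq_getElem (by omega : pos.toNat - 1 < alive.length)] at hc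
        have := getElem_inj alive hsort _ _ (by omega) hpt (Option.some.inj hc)
        omega)]
    rw [if_neg (by
      intro hc
      simp only [pvLinkAt] at hc
      have h2' : pos.toNat + 1 < alive.length := by
        by_contra hc2
        rw [List.getElem?_eq_none (by omega)] at hc
        cases hc
      rw [List.getElem?_eq_getElem h2'] at hc
      have := getElem_inj alive hsort _ _ h2' hpt (Option.some.inj hc)
      omega)]
    rw [hTD]
  have hstk' : pvStackInv nn
      (pvAdj T (pvLinkAt alive pos.toNat).1 (pvLinkAt alive pos.toNat).2
        (pvLinkAt alive pos.toNat).2 (pvLinkAt alive pos.toNat).1)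
      ((alive.eraseIdx pos.toNat).insertIdx pos.toNat (alive[pos.toNat]'hpt)) sa sb := by
    rw [List.insertIdx_eraseIdx_getElem hpt]
    refine stackinv_mono nn T _ alive sa sb hstk ?_
    intro x hx
    exact getD_pvAdj_not_mem T _ _ _ _ alive hPmem hQmem hpq x hx
  have htake' : ∀ a ∈ (alive.eraseIdx pos.toNat).take pos.toNat, a < alive[pos.toNat]'hpt := by
    intro a ha
    obtain ⟨j, hj, hjv⟩ := List.mem_iff_getElem.mp ha
    have hjlt : j < pos.toNat := by
      have := hj
      rw [List.length_take] at this
      omega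
    rw [List.getElem_take] at hjv
    have hjv' : (alive.eraseIdx pos.toNat)[j]? = some a := by
      rw [List.getElem?_eq_getElem (by omega : j < (alive.eraseIdx pos.toNat).length), hjv]
    rw [hEj j, if_pos hjlt, List.getElem?_eq_getElem (by omega : j < alive.length)] at hjv'
    rw [← Option.some.inj hjv']
    exact getElem_lt_getElem alive hsort _ _ _ hpt hjlt
  have hdrop' : ∀ a ∈ (alive.eraseIdx pos.toNat).drop pos.toNat, alive[pos.toNat]'hpt < a := by
    intro a ha
    obtain ⟨j, hj, hjv⟩ := List.mem_iff_getElem.mp ha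
    have hjl : pos.toNat + j < (alive.eraseIdx pos.toNat).length := by
      have := hj
      rw [List.length_drop] at this
      omega
    rw [List.getElem_drop] at hjv
    have hjv' : (alive.eraseIdx pos.toNat)[pos.toNat + j]? = some a := by
      rw [List.getElem?_eq_getElem hjl, hjv]
    rw [hEj _, if_neg (by omega),
      List.getElem?_eq_getElem (by rw [hlenE] at hjl; omega : pos.toNat + j + 1 < alive.length)] at hjv'
    rw [← Option.some.inj hjv']
    exact getElem_lt_getElem alive hsort _ _ hpt _ (by omega)
  have hstackhead : pvStackInv nn
      (pvAdj T (pvLinkAt alive pos.toNat).1 (pvLinkAt alive pos.toNat).2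
        (pvLinkAt alive pos.toNat).2 (pvLinkAt alive pos.toNat).1)
      (alive.eraseIdx pos.toNat)
      ((alive[pos.toNat]'hpt, (pvLinkAt alive pos.toNat).1, (pvLinkAt alive pos.toNat).2) :: sa)
      ((alive[pos.toNat]'hpt, pos) :: sb) := by
    refine ⟨rfl, (hbnd _ (List.getElem_mem hpt)).1, (hbnd _ (List.getElem_mem hpt)).2,
      hp0, by rw [hlenE]; omega, htake', hdrop', ?_, ?_, hT2cur, ?_⟩
    · simp only [pvLinkAt]
      by_cases h0 : pos.toNat = 0
      · rw [if_pos h0, if_pos h0]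
      · rw [if_neg h0, if_neg h0, hEj (pos.toNat - 1), if_pos (by omega)]
    · simp only [pvLinkAt]
      rw [hEj pos.toNat, if_neg (by omega)]
    · exact hstk'
  by_cases hq : pos.toNat + 1 < alive.length
  · have hQv : (pvLinkAt alive pos.toNat).2 = some (alive[pos.toNat + 1]'hq) := by
      simp only [pvLinkAt]
      rw [List.getElem?_eq_getElem hq]
    rw [hQv] at hstackhead ⊢
    simp only
    have hifc : ¬ (pos = (((alive.eraseIdx pos.toNat).length : Nat) : Int)) := by
      rw [hlenE]; omega
    rw [if_neg hifc]
    refine ⟨hsort', hbnd', ?_, hp0, ?_, ?_, hstackhead⟩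
    · have := hlink'
      rw [hQv] at this
      exact this
    · rw [hlenE]
      omega
    · rw [hEj pos.toNat, if_neg (by omega), List.getElem?_eq_getElem hq]
  · have hQv : (pvLinkAt alive pos.toNat).2 = none := by
      simp only [pvLinkAt]
      rw [List.getElem?_eq_none (by omega)]
    have h0 : ¬ pos.toNat = 0 := by omega
    have hPv : (pvLinkAt alive pos.toNat).1 = some (alive[pos.toNat - 1]'(by omega)) := by
      simp only [pvLinkAt]
      rw [if_neg h0, List.getElem?_eq_getElem (by omega : pos.toNat - 1 < alive.length)]
    rw [hQv] at hstackhead ⊢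
    simp only
    rw [hPv]
    have hifc : pos = (((alive.eraseIdx pos.toNat).length : Nat) : Int) := by
      rw [hlenE]; omega
    rw [if_pos hifc]
    refine ⟨hsort', hbnd', ?_, by omega, ?_, ?_, by rw [← hPv]; exact hstackhead⟩
    · have := hlink'
      rw [hQv, hPv] at this
      exact this
    · rw [hlenE]
      omega
    · rw [(by omega : (pos - 1).toNat = pos.toNat - 1)]
      rw [hEj (pos.toNat - 1), if_pos (by omega),
        List.getElem?_eq_getElem (by omega : pos.toNat - 1 < alive.length)]

lemma good_Z {nn : Int} {T : PySem.Dict Int (Option Int × Option Int)} {ck : Option Int}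
    {alive : List Int} {pos : Int} {ri : Int} {p q : Option Int}
    {sa' : List (Int × Option Int × Option Int)} {d : Int} {sb' : List (Int × Int)}
    (hG : pvInvGood nn T ck ((ri, p, q) :: sa') alive pos ((ri, d) :: sb')) :
    pvInvGood nn (pvAdj T p q (some ri) (some ri)) ck sa'
      (PySem.List.insert alive d ri) (if d ≤ pos then pos + 1 else pos) sb' := by
  obtain ⟨hsort, hbnd, hlink, hp0, hpl, hck, hstk⟩ := hG
  obtain ⟨-, hri0, hrin, hd0, hdlen, htake, hdrop, h8, h9, h10, h11⟩ := hstk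
  subst h8
  subst h9
  have hins : PySem.List.insert alive d ri = alive.insertIdx d.toNat ri := by
    have ha := PySem.List.insert_natCast alive d.toNat ri hdlen
    rw [(by omega : ((d.toNat : Nat) : Int) = d)] at ha
    rw [ha, insertIdx_eq_take_cons_drop alive d.toNat ri hdlen]
  rw [hins]
  have hpq : ∀ pp qq : Int,
      (if d.toNat = 0 then none else alive[d.toNat - 1]?) = some pp →
        alive[d.toNat]? = some qq → pp ≠ qq := by
    intro pp qq hp hq
    by_cases h0 : d.toNat = 0
    · rw [if_pos h0] at hp; cases hp
    · rw [if_neg h0, List.getElem?_eq_getElem (by omega : d.toNat - 1 < alive.length)] at hp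
      have h2' : d.toNat < alive.length := by
        by_contra hc
        rw [List.getElem?_eq_none (by omega)] at hq
        cases hq
      rw [List.getElem?_eq_getElem h2'] at hq
      cases hp; cases hq
      exact ne_of_lt (getElem_lt_getElem alive hsort _ _ (by omega) h2' (by omega))
  have hPmem : ∀ pp : Int,
      (if d.toNat = 0 then none else alive[d.toNat - 1]?) = some pp → pp ∈ alive := by
    intro pp hp
    by_cases h0 : d.toNat = 0
    · rw [if_pos h0] at hp; cases hp
    · rw [if_neg h0, List.getElem?_eq_getElem (by omega : d.toNat - 1 < alive.length)] at hp
      cases hp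
      exact List.getElem_mem _
  have hQmem : ∀ qq : Int, alive[d.toNat]? = some qq → qq ∈ alive := by
    intro qq hq
    have h2' : d.toNat < alive.length := by
      by_contra hc
      rw [List.getElem?_eq_none (by omega)] at hq
      cases hq
    rw [List.getElem?_eq_getElem h2'] at hq
    cases hq
    exact List.getElem_mem _
  have hlenI : (alive.insertIdx d.toNat ri).length = alive.length + 1 := by
    rw [List.length_insertIdx, if_pos hdlen]
  have hIj : ∀ j : Nat, (alive.insertIdx d.toNat ri)[j]? =
      if j < d.toNat then alive[j]? else if j = d.toNat then
        (if j ≤ alive.length then some ri else none) else alive[j - 1]? :=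
    fun j => List.getElem?_insertIdx
  refine ⟨sorted_insert alive d.toNat ri hdlen hsort htake hdrop, ?_, ?_, ?_, ?_, ?_, ?_⟩
  · intro a ha
    rcases (List.mem_insertIdx hdlen).mp ha with h | h
    · subst h
      exact ⟨hri0, hrin⟩
    · exact hbnd a h
  · exact link_insert T alive d.toNat ri hdlen hsort hlink htake hdrop h10
  · split <;> omega
  · rw [hlenI]
    split <;> push_cast <;> omega
  · by_cases hd : d ≤ pos
    · rw [if_pos hd, hck]
      rw [(by omega : (pos + 1).toNat = pos.toNat + 1)]
      rw [hIj (pos.toNat + 1), if_neg (by omega), if_neg (by omega)]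
      congr 1
    · rw [if_neg hd, hck]
      rw [hIj pos.toNat, if_pos (by omega)]
  · refine stackinv_mono nn T _ (alive.insertIdx d.toNat ri) sa' sb' h11 ?_
    intro x hx
    refine getD_pvAdj_not_mem T _ _ _ _ (alive.insertIdx d.toNat ri) ?_ ?_ hpq x hx
    · intro pp hp
      exact (List.mem_insertIdx hdlen).mpr (Or.inr (hPmem pp hp))
    · intro qq hq
      exact (List.mem_insertIdx hdlen).mpr (Or.inr (hQmem qq hq))

lemma good_Z_len (alive : List Int) (d : Int) (ri : Int) :
    (((PySem.List.insert alive d ri).length : Nat) : Int) = (alive.length : Int) + 1 := by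
  rw [PySem.List.length_insert]
  push_cast
  ring

lemma step_ok (nn k : Int) (T : PySem.Dict Int (Option Int × Option Int)) (ck : Option Int)
    (sa : List (Int × Option Int × Option Int)) (alive : List Int) (pos : Int)
    (sb : List (Int × Int)) (c : String) (s' : Int × Int × List Int)
    (hI : pvInv nn k T ck sa alive pos sb)
    (hm : pvV_step (some (pos, (alive.length : Int), sb.map (·.2))) c = some s') :
    pvInv nn k (pvA_step (T, ck, sa) c).1 (pvA_step (T, ck, sa) c).2.1 (pvA_step (T, ck, sa) c).2.2
        (pvB_step (alive, pos, sb) c).1 (pvB_step (alive, pos, sb) c).2.1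
        (pvB_step (alive, pos, sb) c).2.2
      ∧ s' = ((pvB_step (alive, pos, sb) c).2.1, ((pvB_step (alive, pos, sb) c).1.length : Int),
          (pvB_step (alive, pos, sb) c).2.2.map (·.2)) := by
  cases hsp : PySem.Str.split₀ c with
  | nil =>
    simp only [pvV_step, hsp] at hm
    simp at hm
  | cons op rest =>
    simp only [pvV_step, hsp] at hm
    simp only [pvA_step, pvB_step, hsp]
    by_cases hU : op = "U"
    · subst hU
      simp only [reduceIte] at hm ⊢
      cases rest with
      | nil => simp at hm
      | cons astr rest' =>
        dsimp only at hm ⊢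
        cases hof : PySem.Int.ofStr? astr with
        | none => rw [hof] at hm; simp at hm
        | some x =>
          rw [hof] at hm
          simp only at hm ⊢
          by_cases hx : 0 < x
          · rw [if_pos hx] at hm ⊢
            split_ifs at hm with hcond
            · injection hm with hm'
              subst hm'
              rcases hI with hG | ⟨hk, hT, hck, hsa, halive, hpos, hsb⟩
              · exact ⟨Or.inl (good_U hG x hx hcond.1 hcond.2), rfl⟩
              · exfalso
                rw [halive] at hcond
                have hL := PySem.List.length_pyRange_one 0 nn
                omega
          · rw [if_neg hx] at hm ⊢
            injection hm with hm'
            subst hm'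
            have h0 : x.toNat = 0 := by omega
            rw [h0]
            simp only [pvA_walkU]
            exact ⟨hI, trivial⟩
    · simp only [if_neg hU] at hm ⊢
      by_cases hD : op = "D"
      · subst hD
        simp only [reduceIte] at hm ⊢
        cases rest with
        | nil => simp at hm
        | cons astr rest' =>
          dsimp only at hm ⊢
          cases hof : PySem.Int.ofStr? astr with
          | none => rw [hof] at hm; simp at hm
          | some x =>
            rw [hof] at hm
            simp only at hm ⊢
            by_cases hx : 0 < x
            · rw [if_pos hx] at hm ⊢
              split_ifs at hm with hcond
              · injection hm with hm'
                subst hm'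
                rcases hI with hG | ⟨hk, hT, hck, hsa, halive, hpos, hsb⟩
                · exact ⟨Or.inl (good_D hG x hx hcond.1 hcond.2), rfl⟩
                · exfalso
                  rw [halive] at hcond
                  have hL := PySem.List.length_pyRange_one 0 nn
                  omega
            · rw [if_neg hx] at hm ⊢
              injection hm with hm'
              subst hm'
              have h0 : x.toNat = 0 := by omega
              rw [h0]
              simp only [pvA_walkD]
              exact ⟨hI, trivial⟩
      · simp only [if_neg hD] at hm ⊢
        by_cases hC : op = "C"
        · subst hC
          simp only [reduceIte] at hm ⊢
          by_cases hcond : 0 ≤ pos ∧ pos < (alive.length : Int) ∧ 2 ≤ (alive.length : Int)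
          · rw [if_pos hcond] at hm
            injection hm with hm'
            subst hm'
            rcases hI with hG | ⟨hk, hT, hck, hsa, halive, hpos, hsb⟩
            · have hpt : pos.toNat < alive.length := by omega
              have hcks : ck = some (alive[pos.toNat]'hpt) := by
                rw [hG.2.2.2.2.2.1, List.getElem?_eq_getElem hpt]
              have hpop : PySem.List.pop? alive pos
                  = some (alive[pos.toNat]'hpt, alive.eraseIdx pos.toNat) := by
                have h1 := PySem.List.pop?_natCast alive pos.toNat hpt
                rwa [(by omega : ((pos.toNat : Nat) : Int) = pos)] at h1
              rw [hcks, hpop]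
              simp only
              have hlenE : (((alive.eraseIdx pos.toNat).length : Nat) : Int)
                  = (alive.length : Int) - 1 := by
                rw [List.length_eraseIdx, if_pos hpt]
                omega
              refine ⟨Or.inl (good_C hG hcond.2.2 hcks), ?_⟩
              rw [hlenE, List.map_cons]
            · exfalso
              rw [halive] at hcond
              have hL := PySem.List.length_pyRange_one 0 nn
              omega
          · rw [if_neg hcond] at hm
            simp at hm
        · simp only [if_neg hC] at hm ⊢
          by_cases hZ : op = "Z"
          · subst hZ
            simp only [reduceIte] at hm ⊢
            rcases hI with hG | ⟨hk, hT, hck, hsa, halive, hpos, hsb⟩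
            · cases hsb : sb with
              | nil =>
                rw [hsb] at hm
                simp at hm
              | cons e sb' =>
                obtain ⟨row, d⟩ := e
                rw [hsb] at hm
                simp only [List.map_cons] at hm
                injection hm with hm'
                subst hm'
                rw [hsb] at hG
                cases hsa : sa with
                | nil =>
                  exfalso
                  rw [hsa] at hG
                  have := hG.2.2.2.2.2.2
                  simp [pvStackInv] at this
                | cons f sa' =>
                  obtain ⟨ri, p, q⟩ := f
                  rw [hsa] at hG
                  have hrow : row = ri := by
                    have := hG.2.2.2.2.2.2
                    exact this.1
                  subst hrow
                  have hlenI : (((PySem.List.insert alive d row).length : Nat) : Int)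
                      = (alive.length : Int) + 1 := good_Z_len alive d row
                  refine ⟨Or.inl (good_Z hG), ?_⟩
                  rw [hlenI]
            · exfalso
              subst hsb
              simp at hm
          · simp only [if_neg hZ] at hm ⊢
            injection hm with hm'
            subst hm'
            exact ⟨hI, rfl⟩

lemma fold_ok (nn k : Int) : ∀ (cmds : List String)
    (T : PySem.Dict Int (Option Int × Option Int)) (ck : Option Int)
    (sa : List (Int × Option Int × Option Int)) (alive : List Int) (pos : Int)
    (sb : List (Int × Int)),
    pvInv nn k T ck sa alive pos sb →
    (cmds.foldl pvV_step (some (pos, (alive.length : Int), sb.map (·.2)))).isSome = true →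
    pvInv nn k (cmds.foldl pvA_step (T, ck, sa)).1 (cmds.foldl pvA_step (T, ck, sa)).2.1
      (cmds.foldl pvA_step (T, ck, sa)).2.2 (cmds.foldl pvB_step (alive, pos, sb)).1
      (cmds.foldl pvB_step (alive, pos, sb)).2.1 (cmds.foldl pvB_step (alive, pos, sb)).2.2 := by
  intro cmds
  induction cmds with
  | nil => intro T ck sa alive pos sb hI _; exact hI
  | cons c t ih =>
    intro T ck sa alive pos sb hI hsome
    rw [List.foldl_cons] at hsome
    cases hc : pvV_step (some (pos, (alive.length : Int), sb.map (·.2))) c with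
    | none => rw [hc, pvV_foldl_none] at hsome; exact absurd hsome (by simp)
    | some s' =>
      obtain ⟨hI', hs'⟩ := step_ok nn k T ck sa alive pos sb c s' hI hc
      have := ih (pvA_step (T, ck, sa) c).1 (pvA_step (T, ck, sa) c).2.1
        (pvA_step (T, ck, sa) c).2.2 (pvB_step (alive, pos, sb) c).1
        (pvB_step (alive, pos, sb) c).2.1 (pvB_step (alive, pos, sb) c).2.2 hI'
        (by rw [← hs']; rw [hc] at hsome; exact hsome)
      simpa using this

-- ===== VERDICT (by name: the statement is the Claim_ definition above) =====
theorem solution_spec : Claim_equal_solution := by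
  intro n k cmd _hdom hpre
  obtain ⟨hn, hfold⟩ := hpre
  have hInv := fold_ok n k cmd (pvA_init n) (some k) [] (PySem.List.pyRange 0 n 1) k []
    (pvInv_init n k hn) (by simpa [PySem.List.length_pyRange_one, Int.toNat_of_nonneg (by omega : (0:Int) ≤ n)] using hfold)
  unfold Spec_solution solution solution_alt
  have hmap : (cmd.foldl pvA_step (pvA_init n, some k, [])).2.2.map (·.1)
      = (cmd.foldl pvB_step (PySem.List.pyRange 0 n 1, k, [])).2.2.map (·.1) := by
    rcases hInv with h | h
    · exact stackinv_fst _ _ _ _ _ h.2.2.2.2.2.2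
    · simp [h.2.2.2.1, h.2.2.2.2.2.2]
  exact congrArg String.ofList (set_fold_eq _ _
    (by simpa [List.map_reverse] using congrArg List.reverse hmap) _)
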